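-- pv_equiv track=rewrite | github.com/ankan-sur/socialmediaorganizer | exec.py | find_max_common_friends
-- ===== SOURCE A (Python) =====
-- def find_common_friends(name1, name2, friends_dict):
--     '''input:name1,name2 to find the friend lists
--              friends_dict to collect set of friends
--         return: set of intersection between both sets of friends
--     '''
--     for name,friends in friends_dict.items():
--         if name == name1:
--             friend_list1 = friends
--             friend_list1 = set(friend_list1)
--         if name == name2:
--             friend_list2 = friends
--             friend_list2 = set(friend_list2)
--         else:
--             continue
--     set_of_common = friend_list2 & friend_list1 #set.intersection() method used
--     return set_of_common
--
-- def find_max_common_friends(friends_dict): #my most complex function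
--     '''input: dictionary of users: list of friends
--        returns: a list of all users pairs with the most common friends, and the number of most common friends
--     '''
--     max_val = 0
--     common_dict = {} #dict of all user pairs to the number of their common friends
--     for A,A_list in friends_dict.items(): #two nested for loops to cover every pair
--         for B,B_list in friends_dict.items():
--             pair_tup = (A,B)
--             if B == A: #ignoring when A appears as a B value
--                 continue
--             set_of_common = find_common_friends(A,B,friends_dict)
--             common_dict[pair_tup] = len(set_of_common) #{(pair tuple): num of common friends}
--
--     for i,j in common_dict.items(): #iteration to find max
--         if j>max_val:
--             max_val = j
--
--     list_of_names = getKeysByValue(common_dict, max_val) #helper function to collect all keys matching max value, to reduce load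
--
--     for i in list_of_names: #another iteration to remove all double appearances of pairs
--         if (i[1],i[0]) in list_of_names:
--             list_of_names.remove((i[1],i[0]))
--
--     return sorted(list_of_names), max_val
--
-- def getKeysByValue(dictOfElements, valueToFind): #helper function to reduce load
--     '''input: dict to iterate, valueToFind to gather keys
--        returns: a list of keys matching the value given
--     '''
--     listOfKeys = list()
--     listOfItems = dictOfElements.items()
--     for item  in listOfItems:
--         if item[1] == valueToFind:
--             listOfKeys.append(item[0]) #basic terms and layout
--     return listOfKeys
-- ===== SOURCE B (Python) =====
-- def find_max_common_friends(friends_dict):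
--     '''Same result as the original: single triangular pass over the entries,
--     tracking the running maximum and the best pairs directly.'''
--     entries = [(name, set(friends)) for name, friends in friends_dict.items()]
--     max_val = 0
--     best = []
--     while entries:
--         a, a_set = entries.pop(0)
--         for b, b_set in entries:
--             c = len(a_set & b_set)
--             if c > max_val:
--                 max_val = c
--                 best = [(a, b)]
--             elif c == max_val:
--                 best.append((a, b))
--     return sorted(best), max_val
-- ===== Notes on version B (the rewrite author's own statement) =====
-- stated objective: faster
-- what changed: Replaces the all-ordered-pairs common_dict table (each entry recomputed by re-scanning the whole dict in find_common_friends), the separate max-scan, getKeysByValue and the mutating reverse-pair removal loop with one triangular pass over precomputed friend sets that maintains the running maximum and the list of best pairs directly.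
import Mathlib
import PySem

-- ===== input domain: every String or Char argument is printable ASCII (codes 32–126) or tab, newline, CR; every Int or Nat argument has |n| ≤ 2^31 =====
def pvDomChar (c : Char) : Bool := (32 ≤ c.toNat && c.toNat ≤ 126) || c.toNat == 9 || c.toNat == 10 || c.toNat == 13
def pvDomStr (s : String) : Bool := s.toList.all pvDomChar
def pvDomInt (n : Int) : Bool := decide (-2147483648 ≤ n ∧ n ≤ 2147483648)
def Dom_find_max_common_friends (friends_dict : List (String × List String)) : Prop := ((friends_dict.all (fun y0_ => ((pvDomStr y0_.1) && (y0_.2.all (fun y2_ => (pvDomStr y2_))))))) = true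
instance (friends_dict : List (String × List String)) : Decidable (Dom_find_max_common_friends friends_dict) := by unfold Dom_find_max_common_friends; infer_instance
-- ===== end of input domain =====

-- B replaces A's all-ordered-pairs table, max-scan, key-collection and reverse-pair
-- removal loop by one triangular pass over precomputed friend sets (same return value).

-- ===== PORT A =====
-- find_common_friends: loop keeping the last match for each name (Option state);
-- on the path where Python would raise NameError (name never a key — unreachable
-- from A's calls, both names are dict keys) we return the empty set.
def find_common_friends (name1 name2 : String) (friends_dict : PySem.Dict String (List String)) : PySem.Set String :=
  match friends_dict.items.foldl
    (fun (st : Option (PySem.Set String) × Option (PySem.Set String)) p =>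
      (if p.1 == name1 then some (PySem.Set.ofList p.2) else st.1,
       if p.1 == name2 then some (PySem.Set.ofList p.2) else st.2))
    (none, none) with
  | (some fl1, some fl2) => PySem.Set.inter fl2 fl1
  | _ => PySem.Set.empty

def getKeysByValue (dictOfElements : PySem.Dict (String × String) Int) (valueToFind : Int) : List (String × String) :=
  dictOfElements.items.foldl
    (fun listOfKeys item => if item.2 == valueToFind then listOfKeys ++ [item.1] else listOfKeys) []

-- the 'for i in list_of_names: if (i[1],i[0]) in list_of_names: list_of_names.remove(...)' loop:
-- Python's for-loop cursor over the mutating list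
def removeRevLoop (lst : List (String × String)) (i : Nat) : List (String × String) :=
  if h : i < lst.length then
    if lst.contains (lst[i].2, lst[i].1) then removeRevLoop (lst.erase (lst[i].2, lst[i].1)) (i + 1)
    else removeRevLoop lst (i + 1)
  else lst
termination_by lst.length - i
decreasing_by
  · have hm : (lst[i].2, lst[i].1) ∈ lst := by
      rename_i hc; exact List.mem_of_elem_eq_true hc
    have := List.length_erase_of_mem hm
    omega
  · omega

def find_max_common_friends (friends_dict : List (String × List String)) : (List (String × String)) × Int :=
  let d := PySem.Dict.ofList friends_dict
  let common_dict : PySem.Dict (String × String) Int :=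
    d.items.foldl
      (fun cd a =>
        d.items.foldl
          (fun cd b =>
            if b.1 == a.1 then cd
            else cd.insert (a.1, b.1) (PySem.Set.len (find_common_friends a.1 b.1 d)))
          cd)
      PySem.Dict.empty
  let max_val : Int :=
    common_dict.items.foldl (fun max_val ij => if ij.2 > max_val then ij.2 else max_val) 0
  let list_of_names := getKeysByValue common_dict max_val
  (PySem.List.sorted2 (removeRevLoop list_of_names 0) Prod.fst Prod.snd, max_val)

-- ===== PORT B =====
def altStep (a : String × PySem.Set String) (st : Int × List (String × String))
    (b : String × PySem.Set String) : Int × List (String × String) :=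
  let c := PySem.Set.len (PySem.Set.inter a.2 b.2)
  if c > st.1 then (c, [(a.1, b.1)])
  else if c == st.1 then (st.1, st.2 ++ [(a.1, b.1)])
  else st

-- 'while entries: a = entries.pop(0); for b in entries: …'
def altLoop : List (String × PySem.Set String) → Int × List (String × String) → Int × List (String × String)
  | [], st => st
  | a :: t, st => altLoop t (t.foldl (altStep a) st)

def find_max_common_friends_alt (friends_dict : List (String × List String)) : (List (String × String)) × Int :=
  let entries := (PySem.Dict.ofList friends_dict).items.map (fun p => (p.1, PySem.Set.ofList p.2))
  let r := altLoop entries (0, [])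
  (PySem.List.sorted2 r.2 Prod.fst Prod.snd, r.1)

-- ===== PRECONDITION & SPEC =====
def Spec_find_max_common_friends (friends_dict : List (String × List String)) (out : (List (String × String)) × Int) : Prop := out = find_max_common_friends_alt friends_dict
instance (friends_dict : List (String × List String)) (out : (List (String × String)) × Int) : Decidable (Spec_find_max_common_friends friends_dict out) := by unfold Spec_find_max_common_friends; infer_instance

-- ===== CLAIM (what is proved, stated in full; the proofs are below) =====
def Claim_equal_find_max_common_friends : Prop := ∀ (friends_dict : List (String × List String)), Dom_find_max_common_friends friends_dict → Spec_find_max_common_friends friends_dict (find_max_common_friends friends_dict)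

-- ===== LEMMAS AND PROOFS =====

-- abbreviations used only by the proofs
def cval (a b : String × List String) : Int :=
  PySem.Set.len (PySem.Set.inter (PySem.Set.ofList b.2) (PySem.Set.ofList a.2))

-- the flattened contents of A's common_dict
def allPairs (L : List (String × List String)) : List ((String × String) × Int) :=
  L.flatMap (fun a => (L.filter (fun b => !(b.1 == a.1))).map (fun b => ((a.1, b.1), cval a b)))

-- the triangular pair list (B's traversal order)
def triE : List (String × List String) → List ((String × String) × Int)
  | [] => []
  | a :: t => t.map (fun b => ((a.1, b.1), cval a b)) ++ triE t

def mstep (st : Int × List (String × String)) (x : (String × String) × Int) :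
    Int × List (String × String) :=
  if x.2 > st.1 then (x.2, [x.1])
  else if x.2 == st.1 then (st.1, st.2 ++ [x.1]) else st

-- best list for a given target value M, in triangular order
def bestL (M : Int) : List (String × List String) → List (String × String)
  | [] => []
  | a :: t => (t.filter (fun b => cval a b == M)).map (fun b => (a.1, b.1)) ++ bestL M t

-- the effect of the removal loop, structurally
def keepFirst : List (String × String) → List (String × String)
  | [] => []
  | h :: t => h :: keepFirst (t.erase (h.2, h.1))
termination_by l => l.length
decreasing_by simp; exact List.Sublist.length_le (List.erase_sublist (l := t) (a := (h.2, h.1)))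

theorem inter_len_comm (s t : List String) (hs : s.Nodup) (ht : t.Nodup) :
    PySem.Set.len (PySem.Set.inter s t) = PySem.Set.len (PySem.Set.inter t s) := by
  have hperm : (PySem.Set.inter s t).Perm (PySem.Set.inter t s) := by
    rw [List.perm_ext_iff_of_nodup (PySem.Set.nodup_inter s t hs) (PySem.Set.nodup_inter t s ht)]
    intro y
    rw [PySem.Set.mem_inter, PySem.Set.mem_inter]
    exact and_comm
  simp [PySem.Set.len, hperm.length_eq]

theorem cval_comm (a b : String × List String) : cval a b = cval b a := by
  exact inter_len_comm _ _ (PySem.Set.nodup_ofList _) (PySem.Set.nodup_ofList _)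

-- ----- find_common_friends characterization -----
theorem noMatchFold (l : List (String × List String)) (n : String)
    (s : Option (PySem.Set String)) (h : n ∉ l.map (·.1)) :
    l.foldl (fun s p => if p.1 == n then some (PySem.Set.ofList p.2) else s) s = s := by
  induction l generalizing s with
  | nil => rfl
  | cons p t ih =>
    simp only [List.map_cons, List.mem_cons, not_or] at h
    simp only [List.foldl_cons]
    rw [if_neg (by simp only [beq_iff_eq]; exact fun hp => h.1 hp.symm)]
    exact ih _ h.2

theorem lastMatch (l : List (String × List String)) (n : String) (v : List String)
    (s : Option (PySem.Set String)) (hn : (l.map (·.1)).Nodup) (hm : (n, v) ∈ l) :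
    l.foldl (fun s p => if p.1 == n then some (PySem.Set.ofList p.2) else s) s
      = some (PySem.Set.ofList v) := by
  induction l generalizing s with
  | nil => simp at hm
  | cons p t ih =>
    rw [List.map_cons, List.nodup_cons] at hn
    rcases List.mem_cons.mp hm with h | h
    · subst h
      simp only [List.foldl_cons]
      rw [if_pos (by simp)]
      exact noMatchFold t n _ hn.1
    · simp only [List.foldl_cons]
      exact ih _ hn.2 h

theorem pairFold (l : List (String × List String)) (n1 n2 : String)
    (s1 s2 : Option (PySem.Set String)) :
    l.foldl (fun (st : Option (PySem.Set String) × Option (PySem.Set String)) p =>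
      (if p.1 == n1 then some (PySem.Set.ofList p.2) else st.1,
       if p.1 == n2 then some (PySem.Set.ofList p.2) else st.2)) (s1, s2)
    = (l.foldl (fun s p => if p.1 == n1 then some (PySem.Set.ofList p.2) else s) s1,
       l.foldl (fun s p => if p.1 == n2 then some (PySem.Set.ofList p.2) else s) s2) := by
  induction l generalizing s1 s2 with
  | nil => rfl
  | cons p t ih => simp only [List.foldl_cons]; exact ih _ _

theorem fcf_eq (d : PySem.Dict String (List String)) (a b : String × List String)
    (hn : (d.items.map (·.1)).Nodup) (ha : a ∈ d.items) (hb : b ∈ d.items) :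
    find_common_friends a.1 b.1 d
      = PySem.Set.inter (PySem.Set.ofList b.2) (PySem.Set.ofList a.2) := by
  unfold find_common_friends
  rw [pairFold, lastMatch d.items a.1 a.2 none hn (by simpa using ha),
      lastMatch d.items b.1 b.2 none hn (by simpa using hb)]

-- ----- common_dict flattening -----
theorem inner_items (d : PySem.Dict String (List String)) (a : String × List String)
    (cd : PySem.Dict (String × String) Int)
    (hn : (d.items.map (·.1)).Nodup) (ha : a ∈ d.items)
    (hk : ∀ k ∈ cd.keys, k.1 ≠ a.1) :
    (d.items.foldl
      (fun cd b =>
        if b.1 == a.1 then cd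
        else cd.insert (a.1, b.1) (PySem.Set.len (find_common_friends a.1 b.1 d))) cd).items
      = cd.items ++ (d.items.filter (fun b => !(b.1 == a.1))).map (fun b => ((a.1, b.1), cval a b)) := by
  rw [PySem.List.foldl_congr_mem _ _
    (fun cd b => if (!(b.1 == a.1)) = true
      then cd.insert (a.1, b.1) (PySem.Set.len (find_common_friends a.1 b.1 d)) else cd) _
    (fun acc b _ => by cases h : b.1 == a.1 <;> simp [h])]
  rw [PySem.List.foldl_if_eq_foldl_filter]
  have hfresh : ∀ b ∈ d.items.filter (fun b => !(b.1 == a.1)),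
      cd.contains ((a.1, b.1) : String × String) = false := by
    intro b _
    cases h : cd.contains (a.1, b.1) with
    | false => rfl
    | true =>
      exact absurd rfl (hk _ ((PySem.Dict.contains_iff_mem_keys _ _).mp h))
  have hnodupk : ((d.items.filter (fun b => !(b.1 == a.1))).map
      (fun b => ((a.1, b.1) : String × String))).Nodup := by
    have h1 : ((d.items.filter (fun b => !(b.1 == a.1))).map (·.1)).Nodup :=
      hn.sublist (List.Sublist.map _ List.filter_sublist)
    have h2 : (d.items.filter (fun b => !(b.1 == a.1))).map (fun b => ((a.1, b.1) : String × String))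
        = ((d.items.filter (fun b => !(b.1 == a.1))).map (·.1)).map (fun k => (a.1, k)) := by
      rw [List.map_map]; rfl
    rw [h2]
    exact h1.map (fun x y hxy => by simpa using hxy)
  have hfold := PySem.Dict.items_foldl_insert_fresh
    (d.items.filter (fun b => !(b.1 == a.1)))
    (fun b => ((a.1, b.1) : String × String))
    (fun b => PySem.Set.len (find_common_friends a.1 b.1 d)) cd hfresh hnodupk
  simp only at hfold
  rw [hfold]
  congr 1
  refine List.map_congr_left (fun b hb => ?_)
  rw [fcf_eq d a b hn ha (List.mem_filter.mp hb).1]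
  rfl

theorem common_outer (d : PySem.Dict String (List String))
    (hn : (d.items.map (·.1)).Nodup) :
    ∀ (l : List (String × List String)) (cd : PySem.Dict (String × String) Int),
    (∀ x ∈ l, x ∈ d.items) → (l.map (·.1)).Nodup →
    (∀ k ∈ cd.keys, k.1 ∉ l.map (·.1)) →
    (l.foldl
      (fun cd a =>
        d.items.foldl
          (fun cd b =>
            if b.1 == a.1 then cd
            else cd.insert (a.1, b.1) (PySem.Set.len (find_common_friends a.1 b.1 d)))
          cd)
      cd).items
      = cd.items ++ l.flatMap (fun a =>
          (d.items.filter (fun b => !(b.1 == a.1))).map (fun b => ((a.1, b.1), cval a b))) := by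
  intro l
  induction l with
  | nil => intro cd _ _ _; simp
  | cons a t ih =>
    intro cd hsub hnd hcd
    rw [List.map_cons, List.nodup_cons] at hnd
    simp only [List.foldl_cons]
    have hstep := inner_items d a cd hn (hsub a List.mem_cons_self)
      (fun k hkk => by
        have := hcd k hkk
        simp only [List.map_cons, List.mem_cons, not_or] at this
        exact fun h => this.1 h)
    rw [ih _ (fun x hx => hsub x (List.mem_cons_of_mem _ hx)) hnd.2 ?keys]
    case keys =>
      intro k hkk
      have hk2 : k ∈ (cd.items ++ (d.items.filter (fun b => !(b.1 == a.1))).map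
          (fun b => ((a.1, b.1), cval a b))).map (·.1) := by
        have : k ∈ ((d.items.foldl
          (fun cd b =>
            if b.1 == a.1 then cd
            else cd.insert (a.1, b.1) (PySem.Set.len (find_common_friends a.1 b.1 d)))
          cd)).items.map (·.1) := hkk
        rwa [hstep] at this
      rw [List.map_append] at hk2
      rcases List.mem_append.mp hk2 with h | h
      · have := hcd k h
        simp only [List.map_cons, List.mem_cons, not_or] at this
        exact this.2
      · rcases List.mem_map.mp h with ⟨p, hp, hpk⟩
        rcases List.mem_map.mp hp with ⟨b, _, rfl⟩
        subst hpk
        exact fun hmem => hnd.1 (by simpa using hmem)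
    rw [hstep, List.flatMap_cons, List.append_assoc]

theorem common_items (d : PySem.Dict String (List String))
    (hn : (d.items.map (·.1)).Nodup) :
    (d.items.foldl
      (fun cd a =>
        d.items.foldl
          (fun cd b =>
            if b.1 == a.1 then cd
            else cd.insert (a.1, b.1) (PySem.Set.len (find_common_friends a.1 b.1 d)))
          cd)
      PySem.Dict.empty).items = allPairs d.items := by
  rw [common_outer d hn d.items PySem.Dict.empty (fun x hx => hx) hn
    (by intro k hk; simp [PySem.Dict.keys_empty] at hk)]
  rfl

-- ----- running max -----
theorem max_loop_eq (l : List ((String × String) × Int)) (m : Int) :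
    l.foldl (fun mv ij => if ij.2 > mv then ij.2 else mv) m
      = l.foldl (fun mv ij => max mv ij.2) m := by
  refine PySem.List.foldl_congr_mem _ _ _ _ (fun acc x _ => ?_)
  by_cases h : x.2 ≤ acc
  · simp [not_lt.mpr h, max_eq_left h]
  · replace h := lt_of_not_ge h
    simp [h, max_eq_right h.le]

theorem foldl_max_le (l : List ((String × String) × Int)) (m c : Int)
    (h0 : m ≤ c) (h : ∀ x ∈ l, x.2 ≤ c) :
    l.foldl (fun mv ij => max mv ij.2) m ≤ c := by
  induction l generalizing m with
  | nil => exact h0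
  | cons x t ih =>
    simp only [List.foldl_cons]
    exact ih _ (max_le h0 (h x List.mem_cons_self)) (fun y hy => h y (List.mem_cons_of_mem _ hy))

theorem mem_allPairs (L : List (String × List String)) (x : (String × String) × Int) :
    x ∈ allPairs L ↔ ∃ a ∈ L, ∃ b ∈ L, ¬ b.1 = a.1 ∧ x = ((a.1, b.1), cval a b) := by
  unfold allPairs
  rw [List.mem_flatMap]
  constructor
  · rintro ⟨a, ha, hx⟩
    rcases List.mem_map.mp hx with ⟨b, hbf, rfl⟩
    rcases List.mem_filter.mp hbf with ⟨hb, hne⟩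
    exact ⟨a, ha, b, hb, by simpa using hne, rfl⟩
  · rintro ⟨a, ha, b, hb, hne, rfl⟩
    exact ⟨a, ha, List.mem_map.mpr ⟨b, List.mem_filter.mpr ⟨hb, by simpa using hne⟩, rfl⟩⟩

theorem triE_subset_allPairs (L : List (String × List String))
    (hn : (L.map (·.1)).Nodup) (x : (String × String) × Int) (hx : x ∈ triE L) :
    x ∈ allPairs L := by
  induction L with
  | nil => simp [triE] at hx
  | cons a t ih =>
    rw [List.map_cons, List.nodup_cons] at hn
    rw [triE, List.mem_append] at hx
    rcases hx with hx | hx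
    · rcases List.mem_map.mp hx with ⟨b, hb, rfl⟩
      refine (mem_allPairs _ _).mpr ⟨a, List.mem_cons_self, b, List.mem_cons_of_mem _ hb, ?_, rfl⟩
      intro he
      exact hn.1 (he ▸ List.mem_map.mpr ⟨b, hb, rfl⟩)
    · have := ih hn.2 hx
      rcases (mem_allPairs _ _).mp this with ⟨a', ha', b', hb', hne, rfl⟩
      exact (mem_allPairs _ _).mpr ⟨a', List.mem_cons_of_mem _ ha', b',
        List.mem_cons_of_mem _ hb', hne, rfl⟩

theorem cval_mem_triE_vals (L : List (String × List String))
    (hn : (L.map (·.1)).Nodup) (a b : String × List String)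
    (ha : a ∈ L) (hb : b ∈ L) (hne : ¬ b.1 = a.1) :
    cval a b ∈ (triE L).map (·.2) := by
  induction L with
  | nil => simp at ha
  | cons c t ih =>
    rw [List.map_cons, List.nodup_cons] at hn
    rw [triE, List.map_append, List.mem_append, List.map_map]
    rcases List.mem_cons.mp ha with rfl | hat
    · rcases List.mem_cons.mp hb with rfl | hbt
      · exact absurd rfl hne
      · exact Or.inl (List.mem_map.mpr ⟨b, hbt, rfl⟩)
    · rcases List.mem_cons.mp hb with rfl | hbt
      · refine Or.inl (List.mem_map.mpr ⟨a, hat, ?_⟩)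
        simp [cval_comm a b]
      · exact Or.inr (ih hn.2 hat hbt)

theorem max_allPairs_eq_max_triE (L : List (String × List String))
    (hn : (L.map (·.1)).Nodup) :
    (allPairs L).foldl (fun mv ij => max mv ij.2) 0
      = (triE L).foldl (fun mv ij => max mv ij.2) 0 := by
  have hA := PySem.List.le_foldl_max_int (allPairs L) (fun y => y.2) 0
  have hT := PySem.List.le_foldl_max_int (triE L) (fun y => y.2) 0
  simp only at hA hT
  apply le_antisymm
  · apply foldl_max_le _ _ _ hT.1
    intro x hx
    rcases (mem_allPairs _ _).mp hx with ⟨a, ha, b, hb, hne, rfl⟩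
    have := cval_mem_triE_vals L hn a b ha hb hne
    rcases List.mem_map.mp this with ⟨y, hy, hv⟩
    have := hT.2 y hy
    simpa [hv] using this
  · apply foldl_max_le _ _ _ hA.1
    intro x hx
    exact hA.2 x (triE_subset_allPairs L hn x hx)

-- ----- the (max, best) machine -----
theorem machine (l : List ((String × String) × Int)) (mv : Int) (best : List (String × String)) :
    l.foldl mstep (mv, best)
      = (l.foldl (fun m x => max m x.2) mv,
         (if l.foldl (fun m x => max m x.2) mv = mv then best else [])
           ++ (l.filter (fun x => x.2 == l.foldl (fun m x => max m x.2) mv)).map (·.1)) := by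
  induction l using List.reverseRecOn with
  | nil => simp
  | append_singleton l x ih =>
    rw [List.foldl_append, List.foldl_append, ih]
    have hb := PySem.List.le_foldl_max_int l (fun y => y.2) mv
    simp only at hb
    rw [List.filter_append]
    generalize hM : List.foldl (fun m x => max m x.2) mv l = M at *
    simp only [List.foldl_cons, List.foldl_nil]
    rcases lt_trichotomy M x.2 with hx | hx | hx
    · have hmax : max M x.2 = x.2 := max_eq_right hx.le
      have hfil : l.filter (fun y => y.2 == x.2) = [] := by
        rw [List.filter_eq_nil_iff]
        intro y hy
        have := hb.2 y hy
        simp only [beq_iff_eq]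
        omega
      simp only [mstep, gt_iff_lt, hx, if_true, hmax, hfil]
      rw [if_neg (by have := hb.1; omega)]
      simp
    · have hmax : max M x.2 = M := by omega
      simp only [mstep, gt_iff_lt, hmax]
      rw [if_neg (by omega), if_pos (by simp [hx])]
      subst hx
      by_cases hMv : x.2 = mv <;> simp [hMv, List.append_assoc]
    · have hmax : max M x.2 = M := max_eq_left hx.le
      simp only [mstep, gt_iff_lt, hmax]
      rw [if_neg (by omega), if_neg (by simp only [beq_iff_eq]; omega)]
      have hne : ¬ (x.2 = M) := by omega
      simp [hne]

-- triangular pairs over B's (name, set) entries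
def triS : List (String × PySem.Set String) → List ((String × String) × Int)
  | [] => []
  | a :: t => t.map (fun b => ((a.1, b.1), PySem.Set.len (PySem.Set.inter a.2 b.2))) ++ triS t

theorem altLoop_eq (l : List (String × PySem.Set String)) (st : Int × List (String × String)) :
    altLoop l st = (triS l).foldl mstep st := by
  induction l generalizing st with
  | nil => rfl
  | cons a t ih =>
    show altLoop t (t.foldl (altStep a) st) = _
    rw [triS, List.foldl_append, ih]
    congr 1
    rw [List.foldl_map]
    exact PySem.List.foldl_congr_mem _ _ _ _ (fun acc b _ => by simp [altStep, mstep])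

theorem triS_map (L : List (String × List String)) :
    triS (L.map (fun p => (p.1, PySem.Set.ofList p.2))) = triE L := by
  induction L with
  | nil => rfl
  | cons a t ih =>
    simp only [List.map_cons, triS, triE, ih, List.map_map]
    congr 1
    refine List.map_congr_left (fun b _ => ?_)
    have h := inter_len_comm (PySem.Set.ofList a.2) (PySem.Set.ofList b.2)
      (PySem.Set.nodup_ofList _) (PySem.Set.nodup_ofList _)
    simp only [PySem.Set.len] at h
    simp only [cval, PySem.Set.len, Function.comp]
    exact Prod.ext rfl h

-- ----- removal loop = keepFirst -----
theorem loop_keepFirst (rest done : List (String × String))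
    (hnd : (done ++ rest).Nodup)
    (hirr : ∀ p ∈ rest, p.1 ≠ p.2)
    (hcl : ∀ p ∈ rest, (p.2, p.1) ∈ rest)
    (hdone : ∀ p ∈ done, (p.2, p.1) ∉ done ++ rest) :
    removeRevLoop (done ++ rest) done.length = done ++ keepFirst rest := by
  match rest with
  | [] =>
    unfold removeRevLoop
    rw [dif_neg (by simp)]
    simp [keepFirst]
  | h :: t =>
    have hlen : done.length < (done ++ h :: t).length := by simp
    have hget : (done ++ h :: t)[done.length]'hlen = h := by
      rw [List.getElem_append_right (Nat.le_refl _)]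
      simp
    have hswap_ne_h : (h.2, h.1) ≠ h := by
      intro he
      exact hirr h List.mem_cons_self (by
        have := congrArg Prod.fst he
        simp at this
        exact this.symm)
    have hswap_mem_t : (h.2, h.1) ∈ t := by
      rcases List.mem_cons.mp (hcl h List.mem_cons_self) with he | ht
      · exact absurd he hswap_ne_h
      · exact ht
    have hswap_notin_done : (h.2, h.1) ∉ done := by
      intro hmem
      exact hdone _ hmem (by simp)
    have hrest_nodup : (h :: t).Nodup := (List.nodup_append.mp hnd).2.1
    have ht_nodup : t.Nodup := (List.nodup_cons.mp hrest_nodup).2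
    have herase : (done ++ h :: t).erase (h.2, h.1) = done ++ h :: t.erase (h.2, h.1) := by
      rw [List.erase_append_right _ hswap_notin_done]
      congr 1
      rw [List.erase_cons_tail]
      simp only [beq_iff_eq]
      exact fun he => hswap_ne_h he.symm
    unfold removeRevLoop
    rw [dif_pos hlen]
    simp only [hget]
    rw [if_pos (by
      have : (h.2, h.1) ∈ done ++ h :: t :=
        List.mem_append_right _ (List.mem_cons_of_mem _ hswap_mem_t)
      exact List.elem_eq_true_of_mem this)]
    rw [herase]
    have hassoc : done ++ h :: t.erase (h.2, h.1) = (done ++ [h]) ++ t.erase (h.2, h.1) := by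
      simp
    have hlen1 : done.length + 1 = (done ++ [h]).length := by simp
    rw [hassoc, hlen1]
    rw [loop_keepFirst (t.erase (h.2, h.1)) (done ++ [h]) ?nd ?irr ?cl ?dn]
    case nd =>
      have hsub : (done ++ h :: t.erase (h.2, h.1)).Sublist (done ++ h :: t) :=
        List.Sublist.append_left (List.Sublist.cons₂ h (List.erase_sublist)) done
      rw [← hassoc]
      exact hsub.nodup hnd
    case irr =>
      intro p hp
      exact hirr p (List.mem_cons_of_mem _ ((List.erase_sublist).mem hp))
    case cl =>
      intro p hp
      rw [ht_nodup.mem_erase_iff] at hp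
      have hps : (p.2, p.1) ∈ h :: t := hcl p (List.mem_cons_of_mem _ hp.2)
      have hps_ne_h : (p.2, p.1) ≠ h := by
        intro he
        apply hp.1
        have h1 := congrArg Prod.fst he
        have h2 := congrArg Prod.snd he
        simp at h1 h2
        rw [← h1, ← h2]
      have hps_ne_swap : (p.2, p.1) ≠ (h.2, h.1) := by
        intro he
        have h1 := congrArg Prod.fst he
        have h2 := congrArg Prod.snd he
        simp at h1 h2
        apply (List.nodup_cons.mp hrest_nodup).1
        have : p = h := by
          cases p; cases h; simp at h1 h2 ⊢; exact ⟨h2, h1⟩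
        rw [← this]; exact hp.2
      rw [ht_nodup.mem_erase_iff]
      exact ⟨hps_ne_swap, by
        rcases List.mem_cons.mp hps with he | ht'
        · exact absurd he hps_ne_h
        · exact ht'⟩
    case dn =>
      intro p hp
      rcases List.mem_append.mp hp with hpd | hph
      · intro hmem
        apply hdone p hpd
        rcases List.mem_append.mp hmem with h1 | h1
        · rcases List.mem_append.mp h1 with h2 | h2
          · exact List.mem_append_left _ h2
          · rw [List.mem_singleton.mp h2]
            exact List.mem_append_right _ List.mem_cons_self
        · exact List.mem_append_right _ (List.mem_cons_of_mem _ ((List.erase_sublist).mem h1))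
      · rcases List.mem_singleton.mp hph with rfl
        intro hmem
        rcases List.mem_append.mp hmem with h1 | h1
        · rcases List.mem_append.mp h1 with h2 | h2
          · exact hswap_notin_done h2
          · exact hswap_ne_h (List.mem_singleton.mp h2)
        · exact (List.Nodup.mem_erase_iff ht_nodup).mp h1 |>.1 rfl
    rw [keepFirst]
    simp
termination_by rest.length
decreasing_by
  simp
  exact List.Sublist.length_le (List.erase_sublist)

-- ----- keepFirst of the symmetric list = triangular best -----
-- one block of A's max-pair list, after the value filter
def blockP (M : Int) (a' : String × List String) (l : List (String × List String)) :
    List (String × String) :=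
  (l.filter (fun b => !(b.1 == a'.1) && (cval a' b == M))).map (fun b => (a'.1, b.1))

theorem fmpush {α β γ : Type} (l : List α) (f : α → List β) (p : β → Bool) (g : β → γ) :
    ((l.flatMap f).filter p).map g = l.flatMap (fun a => ((f a).filter p).map g) := by
  induction l with
  | nil => rfl
  | cons a t ih => rw [List.flatMap_cons, List.filter_append, List.map_append, ih, List.flatMap_cons]

theorem names_eq (L : List (String × List String)) (M : Int) :
    ((allPairs L).filter (fun it => it.2 == M)).map (·.1)
      = L.flatMap (fun a' => blockP M a' L) := by
  unfold allPairs
  rw [fmpush]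
  refine List.flatMap_congr (fun a' _ => ?_)
  rw [List.filter_map, List.map_map]
  unfold blockP
  rw [List.filter_filter]
  have hmap : ∀ (l : List (String × List String)),
      List.map ((fun (x : (String × String) × Int) => x.1) ∘ fun b => ((a'.1, b.1), cval a' b)) l
        = List.map (fun b => ((a'.1, b.1) : String × String)) l :=
    fun l => List.map_congr_left (fun b _ => rfl)
  rw [hmap]
  congr 1
  refine List.filter_congr (fun b _ => ?_)
  simp [Bool.and_comm]

theorem KF1 (xs ys : List (String × String))
    (h : xs.Pairwise (fun p r => r ≠ (p.2, p.1))) :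
    keepFirst (xs ++ ys)
      = xs ++ keepFirst (xs.foldl (fun l p => l.erase (p.2, p.1)) ys) := by
  induction xs generalizing ys with
  | nil => rfl
  | cons p xs' ih =>
    rw [List.pairwise_cons] at h
    rw [List.cons_append, keepFirst]
    rw [List.erase_append_right _ (fun hmem => (h.1 _ hmem) rfl)]
    rw [ih _ h.2, List.cons_append, List.foldl_cons]

theorem eraseFoldl_push (zs : List (String × String)) (l1 l2 : List (String × String))
    (h : ∀ p ∈ zs, (p.2, p.1) ∉ l1) :
    zs.foldl (fun l p => l.erase (p.2, p.1)) (l1 ++ l2)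
      = l1 ++ zs.foldl (fun l p => l.erase (p.2, p.1)) l2 := by
  induction zs generalizing l2 with
  | nil => rfl
  | cons z zs' ih =>
    rw [List.foldl_cons, List.foldl_cons,
      List.erase_append_right _ (h z List.mem_cons_self)]
    exact ih _ (fun p hp => h p (List.mem_cons_of_mem _ hp))

theorem KF2gen (a : String × List String) (t : List (String × List String)) (M : Int)
    (hA : a.1 ∉ t.map (·.1)) :
    ∀ u : List (String × List String), (∀ x ∈ u, x ∈ t) →
    ((u.filter (fun b => cval a b == M)).map (fun b => ((a.1, b.1) : String × String))).foldl
        (fun l p => l.erase (p.2, p.1))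
        (u.flatMap (fun a' =>
          (if cval a' a == M then [((a'.1, a.1) : String × String)] else [])
            ++ blockP M a' t))
      = u.flatMap (fun a' => blockP M a' t) := by
  intro u
  induction u with
  | nil => intro _; rfl
  | cons b u' ih =>
    intro hu
    have hb_t : b ∈ t := hu b List.mem_cons_self
    have hpush : ∀ p ∈ (u'.filter (fun b => cval a b == M)).map
        (fun b => ((a.1, b.1) : String × String)), (p.2, p.1) ∉ blockP M b t := by
      intro p hp hmem
      rcases List.mem_map.mp hp with ⟨c, _, rfl⟩
      unfold blockP at hmem
      rcases List.mem_map.mp hmem with ⟨d, hd, hde⟩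
      have h2 := congrArg Prod.snd hde
      simp only at h2
      exact hA (h2 ▸ List.mem_map.mpr ⟨d, (List.mem_filter.mp hd).1, rfl⟩)
    rw [List.flatMap_cons, List.flatMap_cons]
    by_cases hq : (cval a b == M) = true
    · have hq' : (cval b a == M) = true := by
        rw [beq_iff_eq] at hq ⊢
        rw [cval_comm b a]
        exact hq
      rw [List.filter_cons, if_pos hq, List.map_cons, List.foldl_cons]
      rw [if_pos hq', List.singleton_append, List.cons_append, List.erase_cons_head]
      rw [eraseFoldl_push _ _ _ hpush]
      rw [ih (fun x hx => hu x (List.mem_cons_of_mem _ hx))]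
    · have hq' : ¬ (cval b a == M) = true := by
        rw [beq_iff_eq] at hq ⊢
        rw [cval_comm b a]
        exact hq
      rw [List.filter_cons, if_neg hq, if_neg hq', List.nil_append]
      rw [eraseFoldl_push _ _ _ hpush]
      rw [ih (fun x hx => hu x (List.mem_cons_of_mem _ hx))]

theorem main_keepFirst (L : List (String × List String)) (M : Int)
    (hn : (L.map (·.1)).Nodup) :
    keepFirst (((allPairs L).filter (fun it => it.2 == M)).map (·.1)) = bestL M L := by
  rw [names_eq]
  induction L with
  | nil =>
    rw [List.flatMap_nil, keepFirst]
    rfl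
  | cons a t ih =>
    rw [List.map_cons, List.nodup_cons] at hn
    rw [List.flatMap_cons]
    have hF : blockP M a (a :: t)
        = (t.filter (fun b => cval a b == M)).map (fun b => ((a.1, b.1) : String × String)) := by
      unfold blockP
      rw [List.filter_cons_of_neg (by simp)]
      congr 1
      refine List.filter_congr (fun b hb => ?_)
      have : ¬ b.1 = a.1 := fun he => hn.1 (he ▸ List.mem_map.mpr ⟨b, hb, rfl⟩)
      simp [this]
    have hblocks : ∀ a' ∈ t, blockP M a' (a :: t)
        = (if cval a' a == M then [((a'.1, a.1) : String × String)] else [])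
            ++ blockP M a' t := by
      intro a' ha'
      unfold blockP
      have hne : ¬ a.1 = a'.1 := fun he => hn.1 (he ▸ List.mem_map.mpr ⟨a', ha', rfl⟩)
      by_cases hq : cval a' a == M
      · rw [List.filter_cons_of_pos (by simp [hne, hq]), List.map_cons, if_pos hq]
        rfl
      · rw [List.filter_cons_of_neg (by simp [hne]; simpa using hq), if_neg hq, List.nil_append]
    rw [List.flatMap_congr hblocks]  -- flatMap over t with rewritten blocks
    rw [hF]
    have hpw : ((t.filter (fun b => cval a b == M)).map
        (fun b => ((a.1, b.1) : String × String))).Pairwise (fun p r => r ≠ (p.2, p.1)) := by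
      rw [List.pairwise_map]
      refine List.pairwise_of_forall_mem_list (fun b hb c _ => ?_)
      intro he
      have h1 := congrArg Prod.fst he
      simp only at h1
      exact hn.1 (h1 ▸ List.mem_map.mpr ⟨b, (List.mem_filter.mp hb).1, rfl⟩)
    rw [KF1 _ _ hpw]
    rw [KF2gen a t M (fun hm => hn.1 hm) t (fun x hx => hx)]
    rw [bestL]
    rw [ih hn.2]

def Mtri (L : List (String × List String)) : Int :=
  (triE L).foldl (fun m x => max m x.2) 0

theorem triE_filter (L : List (String × List String)) (M : Int) :
    ((triE L).filter (fun x => x.2 == M)).map (·.1) = bestL M L := by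
  induction L with
  | nil => rfl
  | cons a t ih =>
    rw [triE, List.filter_append, List.map_append, ih, bestL]
    congr 1
    rw [List.filter_map, List.map_map]
    rfl

theorem pairKeys_nodup (L : List (String × List String)) (hn : (L.map (·.1)).Nodup) :
    ∀ out : List (String × List String), (out.map (·.1)).Nodup →
    (out.flatMap (fun a => (L.filter (fun b => !(b.1 == a.1))).map
      (fun b => ((a.1, b.1) : String × String)))).Nodup := by
  intro out
  induction out with
  | nil => intro _; simp
  | cons a t ih =>
    intro hout
    rw [List.map_cons, List.nodup_cons] at hout
    rw [List.flatMap_cons, List.nodup_append]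
    refine ⟨?_, ih hout.2, ?_⟩
    · have h1 : ((L.filter (fun b => !(b.1 == a.1))).map (·.1)).Nodup :=
        hn.sublist (List.Sublist.map _ List.filter_sublist)
      have h2 : (L.filter (fun b => !(b.1 == a.1))).map (fun b => ((a.1, b.1) : String × String))
          = ((L.filter (fun b => !(b.1 == a.1))).map (·.1)).map (fun k => (a.1, k)) := by
        rw [List.map_map]; rfl
      rw [h2]
      exact h1.map (fun x y hxy => by simpa using hxy)
    · intro x hx y hy he
      rcases List.mem_map.mp hx with ⟨b, _, rfl⟩
      rcases List.mem_flatMap.mp hy with ⟨a', ha', hy2⟩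
      rcases List.mem_map.mp hy2 with ⟨c, _, rfl⟩
      have h1 := congrArg Prod.fst he
      simp only at h1
      exact hout.1 (h1 ▸ List.mem_map.mpr ⟨a', ha', rfl⟩)

theorem names_nodup (L : List (String × List String)) (M : Int) (hn : (L.map (·.1)).Nodup) :
    (((allPairs L).filter (fun it => it.2 == M)).map (·.1)).Nodup := by
  have hsup : ((allPairs L).map (·.1)).Nodup := by
    unfold allPairs
    rw [List.map_flatMap]
    have : ∀ a : String × List String,
        ((L.filter (fun b => !(b.1 == a.1))).map (fun b => ((a.1, b.1), cval a b))).map (·.1)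
          = (L.filter (fun b => !(b.1 == a.1))).map (fun b => ((a.1, b.1) : String × String)) := by
      intro a; rw [List.map_map]; rfl
    rw [List.flatMap_congr (fun a _ => this a)]
    exact pairKeys_nodup L hn L hn
  exact hsup.sublist (List.Sublist.map _ List.filter_sublist)

theorem mem_names (L : List (String × List String)) (M : Int) (p : String × String) :
    p ∈ ((allPairs L).filter (fun it => it.2 == M)).map (·.1)
      ↔ ∃ a ∈ L, ∃ b ∈ L, ¬ b.1 = a.1 ∧ cval a b = M ∧ p = (a.1, b.1) := by
  constructor
  · intro hp
    rcases List.mem_map.mp hp with ⟨x, hxf, rfl⟩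
    rcases List.mem_filter.mp hxf with ⟨hx, hv⟩
    rcases (mem_allPairs _ _).mp hx with ⟨a, ha, b, hb, hne, rfl⟩
    exact ⟨a, ha, b, hb, hne, by simpa using hv, rfl⟩
  · rintro ⟨a, ha, b, hb, hne, hv, rfl⟩
    exact List.mem_map.mpr ⟨((a.1, b.1), cval a b),
      List.mem_filter.mpr ⟨(mem_allPairs _ _).mpr ⟨a, ha, b, hb, hne, rfl⟩, by simpa using hv⟩, rfl⟩

theorem keys_nodup_of_ofList (fd : List (String × List String)) :
    ((PySem.Dict.ofList fd).items.map (·.1)).Nodup := by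
  have := PySem.Dict.nodup_keys_ofList fd
  simpa [PySem.Dict.keys] using this

theorem A_res (fd : List (String × List String)) :
    find_max_common_friends fd
      = (PySem.List.sorted2 (bestL (Mtri (PySem.Dict.ofList fd).items)
          (PySem.Dict.ofList fd).items) Prod.fst Prod.snd,
         Mtri (PySem.Dict.ofList fd).items) := by
  have hn := keys_nodup_of_ofList fd
  simp only [find_max_common_friends, getKeysByValue]
  rw [PySem.List.foldl_append_if]
  rw [common_items (PySem.Dict.ofList fd) hn]
  rw [max_loop_eq, max_allPairs_eq_max_triE _ hn]
  rw [List.nil_append]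
  have hloop := loop_keepFirst
    (((allPairs (PySem.Dict.ofList fd).items).filter
        (fun it => it.2 == Mtri (PySem.Dict.ofList fd).items)).map (·.1)) []
    (by simpa using names_nodup _ _ hn)
    (fun p hp => by
      rcases (mem_names _ _ _).mp hp with ⟨a, _, b, _, hne, _, rfl⟩
      exact fun he => hne he.symm)
    (fun p hp => by
      rcases (mem_names _ _ _).mp hp with ⟨a, ha, b, hb, hne, hv, rfl⟩
      refine (mem_names _ _ _).mpr ⟨b, hb, a, ha, fun he => hne he.symm, ?_, rfl⟩
      rw [cval_comm b a]; exact hv)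
    (by simp)
  simp only [List.nil_append, List.length_nil] at hloop
  have hM : (List.foldl (fun (mv : Int) (ij : (String × String) × Int) => max mv ij.2) 0
      (triE (PySem.Dict.ofList fd).items)) = Mtri (PySem.Dict.ofList fd).items := rfl
  rw [hM]
  rw [show (Prod.fst : (String × String) × Int → String × String) = (fun x => x.1) from rfl]
  rw [hloop]
  rw [main_keepFirst _ _ hn]

theorem B_res (fd : List (String × List String)) :
    find_max_common_friends_alt fd
      = (PySem.List.sorted2 (bestL (Mtri (PySem.Dict.ofList fd).items)
          (PySem.Dict.ofList fd).items) Prod.fst Prod.snd,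
         Mtri (PySem.Dict.ofList fd).items) := by
  simp only [find_max_common_friends_alt]
  rw [altLoop_eq, triS_map, machine]
  simp only [ite_self, List.nil_append]
  rw [triE_filter]
  rfl

-- ===== VERDICT (by name: the statement is the Claim_ definition above) =====
theorem find_max_common_friends_spec : Claim_equal_find_max_common_friends := by
  intro fd _
  unfold Spec_find_max_common_friends
  rw [A_res fd, B_res fd]
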